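-- pv_equiv track=rewrite | github.com/spapanik/phosphorus | src/phosphorus/lib/resolver.py | split_resolution
-- ===== SOURCE A (Python) =====
-- from typing import Iterator
--
-- def split_resolution(resolution: str) -> Iterator[list[str]]:
--     lines: list[str] = []
--     should_yield = False
--     for line in resolution.splitlines():
--         stripped = line.strip(" \\")
--         if not stripped:
--             pass
--         elif stripped.startswith("#"):
--             lines.append(stripped)
--             should_yield = True
--         else:
--             if should_yield:
--                 if lines:
--                     if any(not line.startswith("#") for line in lines):
--                         yield lines
--                     lines = []
--                 should_yield = False
--             lines.append(stripped)
--     if lines and any(not line.startswith("#") for line in lines):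
--         yield lines
-- ===== SOURCE B (Python) =====
-- from typing import Iterator
--
-- def split_resolution(resolution: str) -> Iterator[list[str]]:
--     # Recursive divide-and-emit: clean first, then repeatedly carve off the first
--     # maximal block and recurse on the remainder.
--     cleaned = [s for s in (ln.strip(" \\") for ln in resolution.splitlines()) if s]
--     yield from _blocks(cleaned)
--
-- def _blocks(items: list[str]) -> Iterator[list[str]]:
--     if not items:
--         return
--     n = 1
--     while n < len(items) and (items[n].startswith("#") or not items[n - 1].startswith("#")):
--         n += 1
--     block = items[:n]
--     if not all(l.startswith("#") for l in block):
--         yield block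
--     yield from _blocks(items[n:])
-- ===== Notes on version B (the rewrite author's own statement) =====
-- stated objective: alternative
-- what changed: B first cleans the lines into a list, then recursively carves off the first maximal block (finding its extent with an explicit index scan) and recurses on the remainder, instead of A's single-pass accumulator loop driven by a should_yield flag.
import Mathlib
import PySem

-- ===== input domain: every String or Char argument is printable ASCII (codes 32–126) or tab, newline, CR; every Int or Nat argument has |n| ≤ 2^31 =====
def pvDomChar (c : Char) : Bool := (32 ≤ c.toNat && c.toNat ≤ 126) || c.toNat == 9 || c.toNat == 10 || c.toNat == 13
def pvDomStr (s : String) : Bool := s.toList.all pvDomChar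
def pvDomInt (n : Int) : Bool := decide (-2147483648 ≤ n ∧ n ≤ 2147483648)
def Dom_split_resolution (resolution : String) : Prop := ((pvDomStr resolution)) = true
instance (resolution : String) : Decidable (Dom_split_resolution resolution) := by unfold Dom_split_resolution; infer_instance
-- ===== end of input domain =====

-- B replaces A's one-pass should_yield accumulator by a recursive divide-and-emit:
-- clean the lines first, then repeatedly carve off the first maximal block and recurse (alternative decomposition).

-- shared tiny helper: "line is a comment" (Python's stripped.startswith("#"))
def isC (s : String) : Bool := PySem.Str.startswith s "#"

-- ===== PORT A =====
-- step of A's loop over the raw splitlines lines; state = (yielded blocks, lines, should_yield)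
def aStep (st : List (List String) × List String × Bool) (line : String) :
    List (List String) × List String × Bool :=
  let stripped := PySem.Str.stripChars line " \\"
  if stripped = "" then st
  else if isC stripped then (st.1, st.2.1 ++ [stripped], true)
  else
    let st' :=
      if st.2.2 then
        if st.2.1 ≠ [] then
          (if st.2.1.any (fun l => !isC l) then st.1 ++ [st.2.1] else st.1,
           ([] : List String), false)
        else (st.1, st.2.1, false)
      else st
    (st'.1, st'.2.1 ++ [stripped], st'.2.2)

def split_resolution (resolution : String) : List (List String) :=
  let st := (PySem.Str.splitlines resolution).foldl aStep ([], [], false)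
  if st.2.1 ≠ [] ∧ st.2.1.any (fun l => !isC l) then st.1 ++ [st.2.1] else st.1

-- ===== PORT B =====
-- Source B's while loop: how many further items belong to the first block (continue while
-- items[n] is a comment or items[n-1] is not)
def bCut (prev : String) (rest : List String) : Nat :=
  match rest with
  | [] => 0
  | x :: xs => if isC x || !isC prev then 1 + bCut x xs else 0

-- Source B's _blocks: slice off the first block, emit it unless all comments, recurse
def bBlocks (items : List String) : List (List String) :=
  match items with
  | [] => []
  | h :: t =>
    let n := 1 + bCut h t
    let block := (h :: t).take n
    (if block.all isC then [] else [block]) ++ bBlocks ((h :: t).drop n)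
termination_by items.length
decreasing_by simp [List.length_drop]

-- Source B's cleaned list comprehension
def bCleaned (resolution : String) : List String :=
  ((PySem.Str.splitlines resolution).map (fun ln => PySem.Str.stripChars ln " \\")).filter
    (fun s => s ≠ "")

def split_resolution_alt (resolution : String) : List (List String) :=
  bBlocks (bCleaned resolution)

-- ===== PRECONDITION & SPEC =====
def Spec_split_resolution (resolution : String) (out : List (List String)) : Prop := out = split_resolution_alt resolution
instance (resolution : String) (out : List (List String)) : Decidable (Spec_split_resolution resolution out) := by unfold Spec_split_resolution; infer_instance

-- ===== CLAIM (what is proved, stated in full; the proofs are below) =====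
def Claim_equal_split_resolution : Prop := ∀ (resolution : String), Dom_split_resolution resolution → Spec_split_resolution resolution (split_resolution resolution)

-- ===== LEMMAS AND PROOFS =====

-- A's step on an already-stripped (and kept) line
def aStep' (st : List (List String) × List String × Bool) (s : String) :
    List (List String) × List String × Bool :=
  if s = "" then st
  else if isC s then (st.1, st.2.1 ++ [s], true)
  else
    let st' :=
      if st.2.2 then
        if st.2.1 ≠ [] then
          (if st.2.1.any (fun l => !isC l) then st.1 ++ [st.2.1] else st.1,
           ([] : List String), false)
        else (st.1, st.2.1, false)
      else st
    (st'.1, st'.2.1 ++ [s], st'.2.2)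

def finalize (st : List (List String) × List String × Bool) : List (List String) :=
  if st.2.1 ≠ [] ∧ st.2.1.any (fun l => !isC l) then st.1 ++ [st.2.1] else st.1

def lastC (b : List String) : Bool := (b.getLast?.map isC).getD false

def good (p q : String) : Bool := isC q || !isC p

lemma bBlocks_cons (h : String) (t : List String) :
    bBlocks (h :: t) =
      (if ((h :: t).take (1 + bCut h t)).all isC then [] else [(h :: t).take (1 + bCut h t)]) ++
        bBlocks ((h :: t).drop (1 + bCut h t)) := by
  rw [bBlocks]

lemma lastC_concat (b : List String) (l : String) : lastC (b ++ [l]) = isC l := by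
  unfold lastC
  rw [List.getLast?_concat]
  rfl

lemma fold_clean (L : List String) (st : List (List String) × List String × Bool) :
    L.foldl aStep st =
      ((L.map (fun ln => PySem.Str.stripChars ln " \\")).filter (fun s => s ≠ "")).foldl aStep' st := by
  induction L generalizing st with
  | nil => rfl
  | cons l L ih =>
    by_cases h : PySem.Str.stripChars l " \\" = ""
    · simp only [List.foldl_cons, List.map_cons, List.filter_cons, h]
      rw [show aStep st l = st by simp [aStep, h]]
      simpa using ih st
    · simp only [List.foldl_cons, List.map_cons, List.filter_cons]
      rw [if_pos (by simpa using h)]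
      rw [show aStep st l = aStep' st (PySem.Str.stripChars l " \\") by
        simp only [aStep, aStep', h]]
      exact ih _

lemma anyNot (L : List String) : (L.any fun l => !isC l) = !L.all isC := by
  induction L with
  | nil => rfl
  | cons h t ih => simp [List.any_cons, List.all_cons, ih]

lemma cut_full (t : List String) (h : String)
    (hc : List.IsChain (fun p q => good p q = true) (h :: t)) : bCut h t = t.length := by
  induction t generalizing h with
  | nil => rfl
  | cons x t' ih =>
    rw [List.isChain_cons_cons] at hc
    have hg : (isC x || !isC h) = true := hc.1
    simp only [bCut, hg, if_true]
    rw [ih x hc.2]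
    simp [Nat.add_comm]

lemma cut_junction (t : List String) (h q l : String) (L : List String)
    (hc : List.IsChain (fun p q => good p q = true) (h :: t))
    (hq : (h :: t).getLast? = some q) (hj : good q l = false) :
    bCut h (t ++ l :: L) = t.length := by
  induction t generalizing h with
  | nil =>
    simp only [List.getLast?_singleton, Option.some.injEq] at hq
    subst hq
    simp only [List.nil_append, bCut]
    rw [show (isC l || !isC h) = false from hj]
    rfl
  | cons x t' ih =>
    rw [List.isChain_cons_cons] at hc
    have hg : (isC x || !isC h) = true := hc.1
    simp only [List.cons_append, bCut, hg, if_true]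
    rw [ih x hc.2 (by simpa using hq)]
    simp [Nat.add_comm]

lemma getLast?_some_of_ne_nil (b : List String) (hb : b ≠ []) : ∃ q, b.getLast? = some q := by
  cases h : b.getLast? with
  | none => exact absurd (List.getLast?_eq_none_iff.mp h) hb
  | some q => exact ⟨q, rfl⟩

lemma main_loop (L : List String) (out : List (List String)) (b : List String)
    (hb : b ≠ []) (hc : List.IsChain (fun p q => good p q = true) b)
    (hL : ∀ s ∈ L, s ≠ "") :
    finalize (L.foldl aStep' (out, b, lastC b)) = out ++ bBlocks (b ++ L) := by
  induction L generalizing out b with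
  | nil =>
    obtain ⟨h, t, rfl⟩ := List.exists_cons_of_ne_nil hb
    rw [List.append_nil, List.foldl_nil]
    rw [show bBlocks (h :: t) = if (h :: t).all isC then [] else [h :: t] by
      rw [bBlocks_cons, cut_full t h hc]
      rw [show (1 : Nat) + t.length = (h :: t).length by simp [Nat.add_comm]]
      rw [List.take_length, List.drop_length, bBlocks]
      simp]
    simp only [finalize, anyNot]
    by_cases hall : (h :: t).all isC = true
    · simp [hall]
    · have hall' : (h :: t).all isC = false := by revert hall; cases (h :: t).all isC <;> simp
      simp [hall']
  | cons l L ih =>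
    have hl : l ≠ "" := hL l (List.mem_cons_self ..)
    have hL' : ∀ s ∈ L, s ≠ "" := fun s hs => hL s (List.mem_cons_of_mem _ hs)
    rw [List.foldl_cons]
    by_cases hC : isC l = true
    · -- comment: append, tag true
      rw [show aStep' (out, b, lastC b) l = (out, b ++ [l], true) by
        simp [aStep', hl, hC]]
      have hne : b ++ [l] ≠ [] := by simp
      have hch : List.IsChain (fun p q => good p q = true) (b ++ [l]) := by
        rw [List.isChain_append]
        refine ⟨hc, List.isChain_singleton _, ?_⟩
        intro x _ y hy
        simp only [List.head?_cons, Option.mem_def, Option.some.injEq] at hy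
        subst hy
        simp [good, hC]
      have := ih out (b ++ [l]) hne hch hL'
      rw [lastC_concat] at this
      rw [hC] at this
      rw [this, List.append_assoc]
      rfl
    · have hC' : isC l = false := by revert hC; cases isC l <;> simp
      by_cases hT : lastC b = true
      · -- boundary: flush the block, start a new one with l
        rw [hT]
        rw [show aStep' (out, b, true) l =
            ((if b.any (fun x => !isC x) then out ++ [b] else out), [l], false) by
          simp only [aStep', if_neg hl, hC', Bool.false_eq_true, if_false, if_pos hb]
          simp]
        obtain ⟨h, t, rfl⟩ := List.exists_cons_of_ne_nil hb
        obtain ⟨q, hq⟩ := getLast?_some_of_ne_nil (h :: t) (by simp)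
        have hqC : isC q = true := by
          have h1 := hT
          simp only [lastC, hq, Option.map_some, Option.getD_some] at h1
          exact h1
        have hj : good q l = false := by simp [good, hC', hqC]
        have hsplit : bBlocks ((h :: t) ++ l :: L) =
            (if (h :: t).all isC then [] else [h :: t]) ++ bBlocks (l :: L) := by
          rw [show (h :: t) ++ l :: L = h :: (t ++ l :: L) by rfl]
          rw [bBlocks_cons, cut_junction t h q l L hc hq hj]
          rw [show (1 : Nat) + t.length = (h :: t).length by simp [Nat.add_comm]]
          rw [show h :: (t ++ l :: L) = (h :: t) ++ l :: L by rfl]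
          rw [List.take_left, List.drop_left]
        have hIH := ih (if (h :: t).any (fun x => !isC x) then out ++ [h :: t] else out) [l]
          (by simp) (List.isChain_singleton _) hL'
        rw [show lastC [l] = isC l by simp [lastC]] at hIH
        rw [hC'] at hIH
        rw [hIH, hsplit, anyNot]
        by_cases hall : (h :: t).all isC = true
        · simp [hall]
        · have hall' : (h :: t).all isC = false := by revert hall; cases (h :: t).all isC <;> simp
          simp [hall']
      · -- no boundary: append, tag stays false
        have hT' : lastC b = false := by revert hT; cases lastC b <;> simp
        rw [hT']
        rw [show aStep' (out, b, false) l = (out, b ++ [l], false) by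
          simp [aStep', hl, hC']]
        have hne : b ++ [l] ≠ [] := by simp
        obtain ⟨q, hq⟩ := getLast?_some_of_ne_nil b hb
        have hqC : isC q = false := by
          have h1 := hT'
          simp only [lastC, hq, Option.map_some, Option.getD_some] at h1
          exact h1
        have hch : List.IsChain (fun p q => good p q = true) (b ++ [l]) := by
          rw [List.isChain_append]
          refine ⟨hc, List.isChain_singleton _, ?_⟩
          intro x hx y hy
          simp only [List.head?_cons, Option.mem_def, Option.some.injEq] at hy
          subst hy
          rw [hq] at hx
          simp only [Option.mem_def, Option.some.injEq] at hx
          subst hx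
          simp [good, hqC]
        have := ih out (b ++ [l]) hne hch hL'
        rw [lastC_concat] at this
        rw [hC'] at this
        rw [this, List.append_assoc]
        rfl

lemma bCleaned_nonempty (resolution : String) : ∀ s ∈ bCleaned resolution, s ≠ "" := by
  intro s hs
  unfold bCleaned at hs
  have := List.of_mem_filter hs
  simpa using this

-- ===== VERDICT (by name: the statement is the Claim_ definition above) =====
theorem split_resolution_spec : Claim_equal_split_resolution := by
  intro resolution _
  unfold Spec_split_resolution split_resolution split_resolution_alt
  rw [show ((PySem.Str.splitlines resolution).foldl aStep ([], [], false)) =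
      (bCleaned resolution).foldl aStep' ([], [], false) from fold_clean _ _]
  have hmem := bCleaned_nonempty resolution
  cases hcl : bCleaned resolution with
  | nil =>
    rw [bBlocks]
    simp
  | cons h t =>
    rw [hcl] at hmem
    have hh : h ≠ "" := hmem h (List.mem_cons_self ..)
    have ht : ∀ s ∈ t, s ≠ "" := fun s hs => hmem s (List.mem_cons_of_mem _ hs)
    rw [List.foldl_cons]
    rw [show aStep' ([], [], false) h = ([], [h], isC h) by
      by_cases hC : isC h = true
      · simp [aStep', hh, hC]
      · have hC' : isC h = false := by revert hC; cases isC h <;> simp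
        simp [aStep', hh, hC']]
    have hmain := main_loop t [] [h] (by simp) (List.isChain_singleton _) ht
    rw [show lastC [h] = isC h by simp [lastC]] at hmain
    simpa [finalize] using hmain
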